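-- pv_equiv track=rewrite | github.com/ca-joe-yang/discard-in-subsampling | utils/search_helper.py | s2dxy
-- ===== SOURCE A (Python) =====
-- def s2dxy(s, L=[2,2,2,2,2]):
--     assert len(s) == len(L)
--
--     dx, dy = 0, 0
--     b = 1
--     for i, (idx, l) in enumerate(zip(s, L)):
--         if idx == -1: idx = 0
--         x = idx % l
--         y = idx // l
--         dx += x * b
--         dy += y * b
--         b *= l
--
--     return dx, dy
-- ===== SOURCE B (Python) =====
-- def s2dxy(s, L=[2,2,2,2,2]):
--     assert len(s) == len(L)
--
--     dx, dy = 0, 0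
--     for k in range(len(s) - 1, -1, -1):
--         idx = s[k]
--         l = L[k]
--         if idx == -1: idx = 0
--         dx = dx * l + idx % l
--         dy = dy * l + idx // l
--     return dx, dy
-- ===== Notes on version B (the rewrite author's own statement) =====
-- stated objective: alternative
-- what changed: Replaces the forward zip/enumerate loop that carries a running positional weight b by an index-based back-to-front Horner loop over range(len(s)-1,-1,-1) that only maintains (dx, dy); no weight variable and no zip exist in B.
import Mathlib
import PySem

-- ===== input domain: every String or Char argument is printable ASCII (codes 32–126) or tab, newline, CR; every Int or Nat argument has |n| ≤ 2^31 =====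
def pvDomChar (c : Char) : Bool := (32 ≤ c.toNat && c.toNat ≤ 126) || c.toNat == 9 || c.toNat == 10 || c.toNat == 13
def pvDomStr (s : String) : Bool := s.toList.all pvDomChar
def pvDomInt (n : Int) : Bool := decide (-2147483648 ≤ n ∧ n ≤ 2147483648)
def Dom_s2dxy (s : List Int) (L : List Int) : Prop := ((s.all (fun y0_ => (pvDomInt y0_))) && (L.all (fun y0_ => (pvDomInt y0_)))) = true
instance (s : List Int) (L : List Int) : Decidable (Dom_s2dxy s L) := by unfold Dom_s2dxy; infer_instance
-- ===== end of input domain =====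

-- B replaces A's forward zip loop with a running positional weight b by an
-- index-based back-to-front Horner loop maintaining only (dx, dy); objective: alternative.

-- ===== PORT A =====
-- forward loop over zip(s, L) carrying (dx, dy, b)
def s2dxyStepA (st : Int × Int × Int) (p : Int × Int) : Int × Int × Int :=
  let idx := if p.1 = -1 then 0 else p.1
  (st.1 + PySem.Int.mod idx p.2 * st.2.2,
   st.2.1 + PySem.Int.floordiv idx p.2 * st.2.2,
   st.2.2 * p.2)

def s2dxy (s : List Int) (L : List Int) : Int × Int :=
  let r := (s.zip L).foldl s2dxyStepA (0, 0, 1)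
  (r.1, r.2.1)

-- ===== PORT B =====
-- Horner loop over the countdown index range, indexing into s and L
def s2dxyStepB (s : List Int) (L : List Int) (st : Int × Int) (k : Int) : Int × Int :=
  let idx0 := PySem.List.pyGetD s k 0
  let l := PySem.List.pyGetD L k 0
  let idx := if idx0 = -1 then 0 else idx0
  (st.1 * l + PySem.Int.mod idx l, st.2 * l + PySem.Int.floordiv idx l)

def s2dxy_alt (s : List Int) (L : List Int) : Int × Int :=
  (PySem.List.pyRange ((s.length : Int) - 1) (-1) (-1)).foldl (s2dxyStepB s L) (0, 0)

-- ===== PRECONDITION & SPEC =====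
-- Pre_ excludes exactly where Python A raises: unequal lengths (AssertionError)
-- and a zero radix in L (ZeroDivisionError).
def Pre_s2dxy (s : List Int) (L : List Int) : Prop :=
  s.length = L.length ∧ ∀ l ∈ L, l ≠ 0
instance (s : List Int) (L : List Int) : Decidable (Pre_s2dxy s L) := by
  unfold Pre_s2dxy; infer_instance

def pvWitness_s2dxy : List Int × List Int := ([3, -1, 1], [2, 3, 2])

def Spec_s2dxy (s : List Int) (L : List Int) (out : Int × Int) : Prop := out = s2dxy_alt s L
instance (s : List Int) (L : List Int) (out : Int × Int) : Decidable (Spec_s2dxy s L out) := by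
  unfold Spec_s2dxy; infer_instance

-- ===== CLAIM =====
def Claim_equal_s2dxy : Prop :=
  ∀ (s : List Int) (L : List Int), Dom_s2dxy s L → Pre_s2dxy s L → Spec_s2dxy s L (s2dxy s L)

-- ===== LEMMAS AND PROOFS =====

-- abstract mixed-radix value of a digit/radix pair list: (dx, dy, product of radices)
def pvMR : List (Int × Int) → Int × Int × Int
  | [] => (0, 0, 1)
  | (i, l) :: t =>
      let idx := if i = -1 then 0 else i
      let r := pvMR t
      (PySem.Int.mod idx l + l * r.1, PySem.Int.floordiv idx l + l * r.2.1, l * r.2.2)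

lemma pvMR_append_singleton (z : List (Int × Int)) (a l : Int) :
    pvMR (z ++ [(a, l)]) =
      (let idx := if a = -1 then 0 else a
       ((pvMR z).1 + PySem.Int.mod idx l * (pvMR z).2.2,
        (pvMR z).2.1 + PySem.Int.floordiv idx l * (pvMR z).2.2,
        (pvMR z).2.2 * l)) := by
  induction z with
  | nil => simp [pvMR]
  | cons p t ih =>
      obtain ⟨i, r⟩ := p
      simp only [List.cons_append, pvMR, ih]
      refine Prod.ext (by ring) (Prod.ext (by ring) (by ring))

-- A's forward fold from a general state computes the pvMR value scaled by b
lemma foldA_eq_pvMR (z : List (Int × Int)) :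
    ∀ (dx dy b : Int),
      z.foldl s2dxyStepA (dx, dy, b) =
        (dx + (pvMR z).1 * b, dy + (pvMR z).2.1 * b, b * (pvMR z).2.2) := by
  induction z with
  | nil => intro dx dy b; simp [pvMR]
  | cons p t ih =>
      intro dx dy b
      obtain ⟨i, l⟩ := p
      simp only [List.foldl_cons, s2dxyStepA, pvMR, ih]
      refine Prod.ext (by ring) (Prod.ext (by ring) (by ring))

-- B's countdown-index fold computes the same pvMR value (Horner form)
lemma foldB_eq_pvMR (s : List Int) :
    ∀ (L : List Int), s.length = L.length → ∀ (st : Int × Int),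
      (PySem.List.pyRange ((s.length : Int) - 1) (-1) (-1)).foldl (s2dxyStepB s L) st =
        (st.1 * (pvMR (s.zip L)).2.2 + (pvMR (s.zip L)).1,
         st.2 * (pvMR (s.zip L)).2.2 + (pvMR (s.zip L)).2.1) := by
  induction s using List.reverseRecOn with
  | nil =>
      intro L h st
      rw [show ((List.nil (α := Int)).length : Int) - 1 = -1 by simp,
          PySem.List.pyRange_neg_one_eq_nil (by omega)]
      simp [pvMR]
  | append_singleton s' a ih =>
      intro L h st
      rcases L.eq_nil_or_concat with rfl | ⟨L', l, rfl⟩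
      · simp at h
      rw [List.concat_eq_append] at h ⊢
      have hlen : s'.length = L'.length := by
        simp [List.length_append] at h; omega
      have hn : ((s' ++ [a]).length : Int) - 1 = (s'.length : Int) := by
        simp [List.length_append]
      rw [hn, PySem.List.pyRange_neg_one_cons (by omega), List.foldl_cons]
      -- head step reads the last elements
      have hga : PySem.List.pyGetD (s' ++ [a]) (s'.length : Int) 0 = a := by
        rw [PySem.List.pyGetD_natCast]
        simp
      have hgl : PySem.List.pyGetD (L' ++ [l]) (s'.length : Int) 0 = l := by
        rw [PySem.List.pyGetD_natCast, hlen]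
        simp
      -- the remaining indices only touch the prefixes
      have hcong :
          (PySem.List.pyRange ((s'.length : Int) - 1) (-1) (-1)).foldl
              (s2dxyStepB (s' ++ [a]) (L' ++ [l]))
              (s2dxyStepB (s' ++ [a]) (L' ++ [l]) st (s'.length : Int)) =
          (PySem.List.pyRange ((s'.length : Int) - 1) (-1) (-1)).foldl
              (s2dxyStepB s' L')
              (s2dxyStepB (s' ++ [a]) (L' ++ [l]) st (s'.length : Int)) := by
        refine PySem.List.foldl_congr_mem _ _ _ _ ?_
        intro acc k hk
        rw [PySem.List.mem_pyRange_neg_one] at hk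
        have hk0 : 0 ≤ k := by omega
        have hks : k < (s'.length : Int) := by omega
        have h1 : PySem.List.pyGetD (s' ++ [a]) k 0 = PySem.List.pyGetD s' k 0 := by
          rw [PySem.List.pyGetD_eq_getElem (s' ++ [a]) 0 hk0 (by simp; omega),
              PySem.List.pyGetD_eq_getElem s' 0 hk0 (by omega)]
          exact List.getElem_append_left (by omega)
        have h2 : PySem.List.pyGetD (L' ++ [l]) k 0 = PySem.List.pyGetD L' k 0 := by
          rw [PySem.List.pyGetD_eq_getElem (L' ++ [l]) 0 hk0 (by simp; omega),
              PySem.List.pyGetD_eq_getElem L' 0 hk0 (by omega)]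
          exact List.getElem_append_left (by omega)
        simp only [s2dxyStepB, h1, h2]
      rw [hcong, ih L' hlen]
      have hz : (s' ++ [a]).zip (L' ++ [l]) = s'.zip L' ++ [(a, l)] :=
        List.zip_append (by omega)
      rw [hz, pvMR_append_singleton]
      simp only [s2dxyStepB, hga, hgl]
      refine Prod.ext (by ring) (by ring)

-- ===== VERDICT =====
theorem s2dxy_spec : Claim_equal_s2dxy := by
  intro s L _ hpre
  unfold Spec_s2dxy s2dxy s2dxy_alt
  rw [foldA_eq_pvMR, foldB_eq_pvMR s L hpre.1]
  simp
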